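-- pv_equiv track=rewrite | github.com/MrBrantCode/unitest_baseline | mut_generate/mist_train_cf/cf_91429/solution.py | find_common_letters
-- ===== SOURCE A (Python) =====
-- def find_common_letters(string1, string2):
--     string1 = string1.lower()
--     string2 = string2.lower()
--     common_letters = {}
--     for letter in string1:
--         if letter.isalpha() and letter in string2:
--             if letter in common_letters:
--                 common_letters[letter] = max(common_letters[letter], string2.count(letter))
--             else:
--                 common_letters[letter] = string2.count(letter)
--     return common_letters
-- ===== SOURCE B (Python) =====
-- def find_common_letters(string1, string2):
--     # counts: run-length groups of the sorted characters of string2 (no per-letter rescans)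
--     counts = {}
--     rest = sorted(string2.lower())
--     while rest:
--         c = rest[0]
--         n = 1
--         while n < len(rest) and rest[n] == c:
--             n += 1
--         counts[c] = n
--         rest = rest[n:]
--     # one pass over string1 with an explicit seen-set; first occurrence wins
--     result = {}
--     seen = set()
--     for c in string1.lower():
--         if c.isalpha() and c in counts and c not in seen:
--             seen.add(c)
--             result[c] = counts[c]
--     return result
-- ===== Notes on version B (the rewrite author's own statement) =====
-- stated objective: faster
-- what changed: B sorts string2 once and builds the letter counts by run-length grouping of the sorted characters, then makes a single pass over string1 guarded by an explicit seen-set, replacing A's per-character substring scan, string2.count rescan and max-based dict re-insertion.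
import Mathlib
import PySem

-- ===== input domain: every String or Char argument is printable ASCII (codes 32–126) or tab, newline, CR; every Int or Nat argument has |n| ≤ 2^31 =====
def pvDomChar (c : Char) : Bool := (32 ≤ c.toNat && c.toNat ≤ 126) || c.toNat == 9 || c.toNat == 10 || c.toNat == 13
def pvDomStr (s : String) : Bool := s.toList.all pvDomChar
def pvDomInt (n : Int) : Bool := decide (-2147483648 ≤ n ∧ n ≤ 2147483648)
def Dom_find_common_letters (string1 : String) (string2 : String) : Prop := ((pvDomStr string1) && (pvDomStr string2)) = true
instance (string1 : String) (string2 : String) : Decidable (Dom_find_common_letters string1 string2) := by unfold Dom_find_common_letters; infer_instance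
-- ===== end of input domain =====

-- B sorts string2 once and builds the letter counts by run-length grouping of the sorted
-- characters, then makes one pass over string1 guarded by an explicit seen-set, replacing
-- A's per-character substring scan, string2.count rescan and max-based dict re-insertion
-- (objective: faster).

-- ===== PORT A =====
-- A iterates over the characters of string1.lower(); each `letter` is a 1-char string, so
-- `letter in string2` / `string2.count(letter)` are exactly char membership / char count in
-- string2's character list, and the dict keys are the singleton strings of those chars.
def find_common_letters (string1 : String) (string2 : String) : List (String × Int) :=
  let l1 := PySem.Chars.lower string1.toList
  let l2 := PySem.Chars.lower string2.toList
  (l1.foldl (fun d c =>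
    if PySem.Chars.isalpha c && l2.contains c then
      if d.contains (String.singleton c) then
        d.insert (String.singleton c) (max (d.getD (String.singleton c) 0) (l2.count c : Int))
      else
        d.insert (String.singleton c) (l2.count c : Int)
    else d) (PySem.Dict.empty : PySem.Dict String Int)).items

-- ===== PORT B =====
-- B's outer while loop over the shrinking sorted list; the inner `while n < len(rest) and
-- rest[n] == rest[0]` counts the leading run, transcribed as the length of the matching
-- takeWhile prefix of the tail (+1 for rest[0] itself).
def pvCountGroups : List Char → PySem.Dict Char Int → PySem.Dict Char Int
  | [], counts => counts
  | c :: rest, counts =>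
      let n := (rest.takeWhile (fun x => x == c)).length + 1
      pvCountGroups ((c :: rest).drop n) (counts.insert c (n : Int))
  termination_by l _ => l.length
  decreasing_by simp

-- `result[c] = counts[c]` is guarded by `c in counts`, so the lookup never misses: getD 0 is exact.
def find_common_letters_alt (string1 : String) (string2 : String) : List (String × Int) :=
  let counts := pvCountGroups
    (PySem.List.sorted (PySem.Chars.lower string2.toList) (fun x => x) false)
    (PySem.Dict.empty : PySem.Dict Char Int)
  ((PySem.Chars.lower string1.toList).foldl
    (fun (p : PySem.Dict String Int × PySem.Set Char) c =>
      if PySem.Chars.isalpha c && counts.contains c && !(PySem.Set.contains p.2 c) then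
        (p.1.insert (String.singleton c) (counts.getD c 0), PySem.Set.add p.2 c)
      else p)
    ((PySem.Dict.empty : PySem.Dict String Int), (PySem.Set.empty : PySem.Set Char))).1.items

-- ===== PRECONDITION & SPEC =====
def Spec_find_common_letters (string1 : String) (string2 : String) (out : List (String × Int)) : Prop := out = find_common_letters_alt string1 string2
instance (string1 : String) (string2 : String) (out : List (String × Int)) : Decidable (Spec_find_common_letters string1 string2 out) := by unfold Spec_find_common_letters; infer_instance

-- ===== CLAIM (what is proved, stated in full; the proofs are below) =====
def Claim_equal_find_common_letters : Prop := ∀ (string1 : String) (string2 : String), Dom_find_common_letters string1 string2 → Spec_find_common_letters string1 string2 (find_common_letters string1 string2)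

-- ===== LEMMAS AND PROOFS =====

theorem singleton_injective {a b : Char} (h : String.singleton a = String.singleton b) : a = b := by
  have := congrArg String.toList h
  simpa [String.singleton] using this

-- core invariant for A: A's dict after processing a prefix has as items the qualifying
-- deduped seen characters, each mapped to its count in l2
theorem foldA_items (l2 : List Char)
    (l : List Char) (s : PySem.Set Char) (d : PySem.Dict String Int)
    (hnd : s.Nodup)
    (hitems : d.items = (s.filter (fun c => PySem.Chars.isalpha c && l2.contains c)).map
      (fun c => (String.singleton c, (l2.count c : Int)))) :
    (l.foldl (fun d c =>
      if PySem.Chars.isalpha c && l2.contains c then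
        if d.contains (String.singleton c) then
          d.insert (String.singleton c) (max (d.getD (String.singleton c) 0) (l2.count c : Int))
        else
          d.insert (String.singleton c) (l2.count c : Int)
      else d) d).items
    = ((PySem.Set.update s l).filter (fun c => PySem.Chars.isalpha c && l2.contains c)).map
      (fun c => (String.singleton c, (l2.count c : Int))) := by
  induction l generalizing s d with
  | nil => simpa [PySem.Set.update] using hitems
  | cons c l ih =>
    simp only [List.foldl_cons, PySem.Set.update] at *
    have hkeys : d.keys = (s.filter (fun c => PySem.Chars.isalpha c && l2.contains c)).map
        (fun c => String.singleton c) := by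
      simp [PySem.Dict.keys, hitems, Function.comp]
    have hknd : d.keys.Nodup := by
      rw [hkeys]
      exact ((hnd.filter _).map (fun _ _ h => singleton_injective h))
    by_cases hcs : c ∈ s
    · -- c already seen: the set does not change
      have hadd : PySem.Set.add s c = s := by
        simp only [PySem.Set.add]
        rw [if_pos ((PySem.Set.contains_iff s c).2 hcs)]
      rw [hadd]
      by_cases hq : (PySem.Chars.isalpha c && l2.contains c) = true
      · -- key already present in d: insert rewrites the same value, items unchanged
        have hcon : d.contains (String.singleton c) = true := by
          apply (PySem.Dict.contains_iff_mem_keys d _).2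
          rw [hkeys]
          exact List.mem_map.2 ⟨c, List.mem_filter.2 ⟨hcs, hq⟩, rfl⟩
        have hget : d.get? (String.singleton c) = some (l2.count c : Int) := by
          apply PySem.Dict.get?_of_mem_items d ?_ hknd
          rw [hitems]
          exact List.mem_map.2 ⟨c, List.mem_filter.2 ⟨hcs, hq⟩, rfl⟩
        have hgetD : d.getD (String.singleton c) 0 = (l2.count c : Int) := by
          rw [PySem.Dict.getD_eq_get?_getD, hget]; rfl
        rw [if_pos hq, if_pos hcon, hgetD, max_self]
        apply ih s _ hnd
        rw [PySem.Dict.items_insert_of_contains _ _ hcon, hitems, List.map_map]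
        apply List.map_congr_left
        intro c' _
        by_cases he : String.singleton c' = String.singleton c
        · have hcc : c' = c := singleton_injective he
          subst hcc
          simp
        · simp only [Function.comp]
          rw [if_neg (by simpa using he)]
      · rw [if_neg (by simpa using hq)]
        exact ih s d hnd hitems
    · -- c is new: the set grows by c at the end
      have hadd : PySem.Set.add s c = s ++ [c] := by
        simp only [PySem.Set.add]
        rw [if_neg]
        intro h
        exact hcs ((PySem.Set.contains_iff s c).1 h)
      have hnd' : (s ++ [c]).Nodup := by
        refine List.nodup_append.2 ⟨hnd, List.nodup_singleton c, ?_⟩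
        intro a ha b hb
        rw [List.mem_singleton] at hb
        subst hb
        intro hac; exact hcs (hac ▸ ha)
      rw [hadd]
      by_cases hq : (PySem.Chars.isalpha c && l2.contains c) = true
      · -- fresh qualifying key: items gain one pair at the end
        have hcon : d.contains (String.singleton c) = false := by
          rcases hh : d.contains (String.singleton c) with _ | _
          · rfl
          · exfalso
            have := (PySem.Dict.contains_iff_mem_keys d _).1 hh
            rw [hkeys] at this
            rcases List.mem_map.1 this with ⟨c', hc', he⟩
            exact hcs ((singleton_injective he) ▸ (List.mem_filter.1 hc').1)
        rw [if_pos hq, if_neg (by simp [hcon])]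
        apply ih (s ++ [c]) _ hnd'
        rw [PySem.Dict.items_insert_of_not_contains _ _ hcon, hitems,
          List.filter_append, List.map_append, List.filter_cons, if_pos hq, List.filter_nil,
          List.map_cons, List.map_nil]
      · rw [if_neg (by simpa using hq)]
        apply ih (s ++ [c]) d hnd'
        rw [hitems, List.filter_append, List.filter_cons, if_neg hq, List.filter_nil,
          List.append_nil]

-- dropping the counted run of a sorted list = dropWhile
theorem drop_takeWhile_len (l : List Char) (p : Char → Bool) :
    l.drop (l.takeWhile p).length = l.dropWhile p := by
  induction l with
  | nil => rfl
  | cons x xs ih =>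
    by_cases h : p x
    · simp [h, ih]
    · simp [h]

-- in a sorted list, the dropped remainder after the leading run of c contains no c
theorem no_head_in_dropWhile (c : Char) (rest : List Char)
    (hp : (c :: rest).Pairwise (· ≤ ·)) :
    c ∉ rest.dropWhile (fun x => x == c) := by
  intro hmem
  have hsub : rest.dropWhile (fun x => x == c) <:+ rest := List.dropWhile_suffix _
  rcases hd : rest.dropWhile (fun x => x == c) with _ | ⟨x0, t⟩
  · rw [hd] at hmem; exact absurd hmem (List.not_mem_nil)
  · have hx0ne : (x0 == c) = false := by
      have := List.head_dropWhile_not (fun x => x == c) (l := rest) (by rw [hd]; simp)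
      simpa [hd] using this
    have hx0mem : x0 ∈ rest := hsub.subset (by rw [hd]; exact List.mem_cons_self)
    have hcle : c ≤ x0 := (List.pairwise_cons.1 hp).1 x0 hx0mem
    have hx0lt : c < x0 := lt_of_le_of_ne hcle (by intro h; simp [← h] at hx0ne)
    rw [hd] at hmem
    rcases List.mem_cons.1 hmem with h | h
    · exact absurd h (ne_of_lt hx0lt)
    · -- c appears after x0 in the sorted remainder: contradiction with x0 ≤ c
      have hrest_pw : rest.Pairwise (· ≤ ·) := (List.pairwise_cons.1 hp).2
      have hpw' : (x0 :: t).Pairwise (· ≤ ·) := hd ▸ hrest_pw.sublist hsub.sublist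
      have : x0 ≤ c := (List.pairwise_cons.1 hpw').1 c h
      exact absurd hx0lt (not_lt.2 this)

-- run-length grouping of a sorted list: lookups are exactly membership and count
theorem pvCountGroups_spec (l : List Char) (d : PySem.Dict Char Int)
    (hp : l.Pairwise (· ≤ ·)) (c : Char) :
    ((pvCountGroups l d).contains c = (l.contains c || d.contains c)) ∧
    ((pvCountGroups l d).getD c 0 = if c ∈ l then (l.count c : Int) else d.getD c 0) := by
  induction l, d using pvCountGroups.induct with
  | case1 counts => simp [pvCountGroups]
  | case2 x rest counts n ih =>
    rw [pvCountGroups]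
    have hdrop : (x :: rest).drop n = rest.dropWhile (fun y => y == x) := by
      show (x :: rest).drop ((rest.takeWhile (fun y => y == x)).length + 1)
          = rest.dropWhile (fun y => y == x)
      rw [List.drop_succ_cons, drop_takeWhile_len]
    have hrest_pw : rest.Pairwise (· ≤ ·) := (List.pairwise_cons.1 hp).2
    have hdrop_pw : ((x :: rest).drop n).Pairwise (· ≤ ·) := by
      rw [hdrop]; exact hrest_pw.sublist (List.dropWhile_suffix _).sublist
    have ihc := ih hdrop_pw
    -- count of x in x :: rest equals n
    have htake_all : ∀ y ∈ rest.takeWhile (fun z => z == x), y = x := by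
      intro y hy
      have := List.mem_takeWhile_imp hy
      simpa using this
    have hcount_x : (x :: rest).count x = n := by
      have hsplit : rest = rest.takeWhile (fun z => z == x) ++ rest.dropWhile (fun z => z == x) :=
        (List.takeWhile_append_dropWhile).symm
      have hc1 : (rest.takeWhile (fun z => z == x)).count x
          = (rest.takeWhile (fun z => z == x)).length := by
        rw [List.count_eq_length]
        intro a ha
        have := htake_all a ha
        simp [this]
      have hc2 : (rest.dropWhile (fun z => z == x)).count x = 0 := by
        rw [List.count_eq_zero]
        exact no_head_in_dropWhile x rest hp
      rw [List.count_cons_self, hsplit, List.count_append, hc1, hc2]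
    by_cases hcx : c = x
    · subst hcx
      have hnotdrop : c ∉ (c :: rest).drop n := by
        rw [hdrop]; exact no_head_in_dropWhile c rest hp
      constructor
      · rw [ihc.1]
        simp [hnotdrop]
      · rw [ihc.2, if_neg hnotdrop, PySem.Dict.getD_insert, if_pos rfl, if_pos List.mem_cons_self,
          hcount_x]
    · have hmemdrop : c ∈ (x :: rest).drop n ↔ c ∈ x :: rest := by
        rw [hdrop]
        constructor
        · intro h; exact List.mem_cons.2 (Or.inr ((List.dropWhile_suffix _).subset h))
        · intro h
          rcases List.mem_cons.1 h with h | h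
          · exact absurd h hcx
          · -- c ∈ rest and c ≠ x: c survives the run of x's
            conv at h => rw [(List.takeWhile_append_dropWhile
              (p := fun z => z == x) (l := rest)).symm]
            rcases List.mem_append.1 h with h | h
            · exact absurd (htake_all c h) hcx
            · exact h
      have hcnt : ((x :: rest).drop n).count c = (x :: rest).count c := by
        rw [hdrop, List.count_cons_of_ne (Ne.symm hcx)]
        conv_rhs => rw [(List.takeWhile_append_dropWhile (p := fun z => z == x) (l := rest)).symm]
        rw [List.count_append]
        have : (rest.takeWhile (fun z => z == x)).count c = 0 := by
          rw [List.count_eq_zero]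
          intro h; exact hcx (htake_all c h)
        omega
      constructor
      · rw [ihc.1, PySem.Dict.contains_insert]
        by_cases h : c ∈ x :: rest
        · simp [hmemdrop.2 h, h]
        · have h1 : c ∉ (x :: rest).drop n := fun hh => h (hmemdrop.1 hh)
          simp [h, h1, hcx]
      · rw [ihc.2, PySem.Dict.getD_insert, if_neg hcx]
        by_cases h : c ∈ x :: rest
        · rw [if_pos (hmemdrop.2 h), if_pos h, hcnt]
        · rw [if_neg (fun hh => h (hmemdrop.1 hh)), if_neg h]

-- core invariant for B: the one-pass loop with a seen-set appends one pair per first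
-- occurrence of a qualifying character
theorem foldB_items (q : Char → Bool) (v : Char → Int)
    (l : List Char) (s : PySem.Set Char) (d : PySem.Dict String Int)
    (hnd : s.Nodup) (hsq : ∀ c ∈ s, q c = true)
    (hitems : d.items = s.map (fun c => (String.singleton c, v c))) :
    ((l.foldl (fun (p : PySem.Dict String Int × PySem.Set Char) c =>
        if q c && !(PySem.Set.contains p.2 c) then
          (p.1.insert (String.singleton c) (v c), PySem.Set.add p.2 c)
        else p) (d, s)).1).items
    = (PySem.Set.update s (l.filter q)).map (fun c => (String.singleton c, v c)) := by
  induction l generalizing s d with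
  | nil => simpa [PySem.Set.update] using hitems
  | cons c l ih =>
    simp only [List.foldl_cons, List.filter_cons]
    by_cases hq : q c = true
    · rw [if_pos hq]
      by_cases hcs : c ∈ s
      · -- already seen: skip, and the set update is a no-op
        rw [if_neg (by simp; exact fun _ => hcs),
          PySem.Set.update_cons, PySem.Set.add_of_mem hcs]
        exact ih s d hnd hsq hitems
      · -- first qualifying occurrence: append the pair and remember c
        rw [if_pos (by simp; exact ⟨hq, hcs⟩),
          PySem.Set.update_cons]
        have hcon : d.contains (String.singleton c) = false := by
          rcases hh : d.contains (String.singleton c) with _ | _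
          · rfl
          · exfalso
            have hk := (PySem.Dict.contains_iff_mem_keys d _).1 hh
            have hkeys : d.keys = s.map (fun c => String.singleton c) := by
              simp [PySem.Dict.keys, hitems, Function.comp]
            rw [hkeys] at hk
            rcases List.mem_map.1 hk with ⟨c', hc', he⟩
            exact hcs ((singleton_injective he) ▸ hc')
        have hadd : PySem.Set.add s c = s ++ [c] := PySem.Set.add_of_not_mem hcs
        have hnd' : (s ++ [c]).Nodup := by
          refine List.nodup_append.2 ⟨hnd, List.nodup_singleton c, ?_⟩
          intro a ha b hb
          rw [List.mem_singleton] at hb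
          subst hb
          intro hac; exact hcs (hac ▸ ha)
        rw [hadd]
        apply ih (s ++ [c]) _ hnd'
        · intro c' hc'
          rcases List.mem_append.1 hc' with h | h
          · exact hsq c' h
          · rw [List.mem_singleton] at h; subst h; exact hq
        · rw [PySem.Dict.items_insert_of_not_contains _ _ hcon, hitems, List.map_append,
            List.map_cons, List.map_nil]
    · rw [if_neg (by simp [hq]), if_neg hq]
      exact ih s d hnd hsq hitems

-- dedup commutes with filter (first occurrences are preserved by filtering)
theorem ofList_filter (p : Char → Bool) (l : List Char) :
    PySem.Set.ofList (l.filter p) = (PySem.Set.ofList l).filter p := by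
  induction l with
  | nil => rfl
  | cons x xs ih =>
    have hdis : ∀ (s : PySem.Set Char),
        (PySem.Set.discard s x).filter p
          = PySem.Set.discard (s.filter p) x := by
      intro s
      simp only [PySem.Set.discard, List.filter_filter]
      apply List.filter_congr
      intro a _
      rw [Bool.and_comm]
    by_cases hp : p x
    · rw [List.filter_cons_of_pos hp, PySem.Set.ofList_cons, PySem.Set.ofList_cons,
        List.filter_cons_of_pos hp, ih, hdis]
    · rw [List.filter_cons_of_neg hp, PySem.Set.ofList_cons, List.filter_cons_of_neg hp, ih]
      simp only [PySem.Set.discard, List.filter_filter]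
      apply List.filter_congr
      intro a _
      by_cases hax : a = x
      · subst hax
        simp [hp]
      · simp [hax]

-- ===== VERDICT (by name: the statement is the Claim_ definition above) =====
theorem find_common_letters_spec : Claim_equal_find_common_letters := by
  intro string1 string2 _
  unfold Spec_find_common_letters find_common_letters find_common_letters_alt
  simp only []
  set l1 := PySem.Chars.lower string1.toList with hl1
  set l2 := PySem.Chars.lower string2.toList with hl2
  set ls := PySem.List.sorted l2 (fun x => x) false with hls
  set counts := pvCountGroups ls (PySem.Dict.empty : PySem.Dict Char Int) with hcounts
  have hperm : ls.Perm l2 := PySem.List.sorted_perm l2 (fun x => x) false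
  have hpw : ls.Pairwise (· ≤ ·) := PySem.List.sorted_pairwise l2 (fun x => x)
  have hspec := fun c => pvCountGroups_spec ls PySem.Dict.empty hpw c
  have hcontains : ∀ c, counts.contains c = l2.contains c := by
    intro c
    rw [hcounts, (hspec c).1, PySem.Dict.contains_empty]
    simp only [Bool.or_false]
    by_cases h : c ∈ l2
    · simp [h, hperm.mem_iff.2 h]
    · have hns : c ∉ ls := fun hh => h (hperm.mem_iff.1 hh)
      simp [h, hns]
  have hgetD : ∀ c, c ∈ l2 → counts.getD c 0 = (l2.count c : Int) := by
    intro c hc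
    rw [hcounts, (hspec c).2, if_pos (hperm.mem_iff.2 hc), hperm.count_eq]
  -- A's side
  have hA := foldA_items l2 l1 (PySem.Set.empty) (PySem.Dict.empty) (by simp [PySem.Set.empty])
    (by simp [PySem.Dict.empty, PySem.Set.empty])
  rw [hA]
  -- B's side
  have hB := foldB_items (fun c => PySem.Chars.isalpha c && counts.contains c)
    (fun c => counts.getD c 0) l1 (PySem.Set.empty) (PySem.Dict.empty)
    (by simp [PySem.Set.empty]) (by simp [PySem.Set.empty])
    (by simp [PySem.Dict.empty, PySem.Set.empty])
  rw [hB, PySem.Set.update_empty, PySem.Set.update_empty, ofList_filter]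
  have hfil : (PySem.Set.ofList l1).filter (fun c => PySem.Chars.isalpha c && l2.contains c)
      = (PySem.Set.ofList l1).filter (fun c => PySem.Chars.isalpha c && counts.contains c) := by
    apply List.filter_congr
    intro c _
    rw [hcontains c]
  rw [hfil]
  apply List.map_congr_left
  intro c hc
  rcases List.mem_filter.1 hc with ⟨_, hq⟩
  have hc2 : c ∈ l2 := by
    rw [Bool.and_eq_true, hcontains c] at hq
    exact (List.contains_iff_mem).1 hq.2
  simp [hgetD c hc2]
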